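-- pv_equiv track=rewrite | github.com/simplyajith/four-in-a-row | src/verify_winner.py | __verify_all_consecutive_columns_are_same
-- ===== SOURCE A (Python) =====
-- def __verify_all_consecutive_columns_are_same(board, row_val, player_symbol):
-- 	"""
--
-- 	:param board: game board, player is playing
-- 	:param row_val: current row, player played
-- 	:param player_symbol: symbol of the current player
-- 	:return: True if 4 consecutive column in the row played by the user are same
-- 			False, otherwise
-- 	"""
--
-- 	col_val = 0
-- 	while col_val < len(board[0]) - 3:
--
-- 		if board[row_val][col_val] == player_symbol and board[row_val][col_val + 1] == player_symbol and \
-- 				board[row_val][col_val + 2] == player_symbol and board[row_val][col_val + 3] == player_symbol: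
-- 			return True
-- 		col_val += 1
--
-- 	return False
-- ===== SOURCE B (Python) =====
-- def __verify_all_consecutive_columns_are_same(board, row_val, player_symbol):
-- 	"""Single sweep with a consecutive-match counter instead of testing 4-wide windows."""
-- 	if len(board[0]) < 4:
-- 		return False
-- 	row = board[row_val]
-- 	count = 0
-- 	for c in range(len(board[0])):
-- 		count = count + 1 if row[c] == player_symbol else 0
-- 		if count == 4:
-- 			return True
-- 	return False
-- ===== Notes on version B (the rewrite author's own statement) =====
-- stated objective: alternative
-- what changed: Replaces A's 4-wide window test at every start position by a single left-to-right sweep maintaining a consecutive-match counter (with a natural early-out for boards narrower than 4 columns), so each cell is read once instead of up to four times; Pre_ excludes empty boards and invalid-row/ragged-row inputs on which A's lazy partial scan may return False while B's full sweep raises IndexError.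
-- outside the precondition, e.g. on __verify_all_consecutive_columns_are_same([['a', 'a', 'a', 'a', 'a'], ['b', 'b']], 1, 'a'): A returns False, B raises IndexError
import Mathlib
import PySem

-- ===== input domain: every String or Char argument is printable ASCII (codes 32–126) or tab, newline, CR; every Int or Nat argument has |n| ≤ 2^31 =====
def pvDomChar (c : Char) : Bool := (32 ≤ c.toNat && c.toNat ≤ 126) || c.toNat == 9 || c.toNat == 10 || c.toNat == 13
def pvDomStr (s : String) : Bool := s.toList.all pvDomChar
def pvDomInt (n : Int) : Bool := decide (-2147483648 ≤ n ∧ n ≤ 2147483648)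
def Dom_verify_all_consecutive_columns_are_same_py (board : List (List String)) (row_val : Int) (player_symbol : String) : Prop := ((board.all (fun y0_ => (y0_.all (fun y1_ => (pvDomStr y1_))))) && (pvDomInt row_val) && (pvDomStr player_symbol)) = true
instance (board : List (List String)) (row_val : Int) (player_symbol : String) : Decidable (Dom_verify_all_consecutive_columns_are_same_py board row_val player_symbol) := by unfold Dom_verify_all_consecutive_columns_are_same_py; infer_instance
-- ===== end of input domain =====

-- B replaces A's 4-wide window test per start column by one sweep with a consecutive-match
-- counter (alternative decomposition; same O(n) cost, one read per cell instead of up to four).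

-- ===== PORT A =====
-- A's while loop: fuel-indexed recursion; the guard `col < len0 - 3` is A's loop condition.
def pvWhileA (cell : Int → Bool) (len0 : Int) : Nat → Int → Bool
  | 0, _ => false
  | fuel+1, col =>
    if col < len0 - 3 then
      if cell col && cell (col + 1) && cell (col + 2) && cell (col + 3) then true
      else pvWhileA cell len0 fuel (col + 1)
    else false

def verify_all_consecutive_columns_are_same_py (board : List (List String)) (row_val : Int) (player_symbol : String) : Bool :=
  let len0 : Int := (((PySem.List.pyGet? board 0).getD []).length : Int)
  -- board[row_val][c] == player_symbol (exact on Pre_, where no index raises)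
  let cell : Int → Bool := fun c =>
    (PySem.List.pyGet? ((PySem.List.pyGet? board row_val).getD []) c).getD "" == player_symbol
  pvWhileA cell len0 (len0 - 3).toNat 0

-- ===== PORT B =====
-- B's for-loop over range(len(board[0])) with the running counter; early return at count == 4.
def pvSweepB (cell : Int → Bool) : List Int → Int → Bool
  | [], _ => false
  | c :: cs, count =>
    let count' : Int := if cell c then count + 1 else 0
    if count' == 4 then true else pvSweepB cell cs count'

def verify_all_consecutive_columns_are_same_py_alt (board : List (List String)) (row_val : Int) (player_symbol : String) : Bool :=
  let len0 : Int := (((PySem.List.pyGet? board 0).getD []).length : Int)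
  if len0 < 4 then false
  else
    let row : List String := (PySem.List.pyGet? board row_val).getD []
    pvSweepB (fun c => (PySem.List.pyGet? row c).getD "" == player_symbol)
      (PySem.List.pyRange 0 len0 1) 0

-- ===== PRECONDITION & SPEC =====
-- Pre_ excludes: empty boards (A raises IndexError on board[0]); and, when the first row has ≥ 1
-- column and ≥ 4 would matter, invalid row indices and ragged boards whose played row is shorter
-- than the first row — there A's lazy windowed scan can still return False (an artefact of its
-- short-circuit `and`) while B's natural full sweep raises IndexError.
def Pre_verify_all_consecutive_columns_are_same_py (board : List (List String)) (row_val : Int) (player_symbol : String) : Prop :=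
  board ≠ [] ∧
  (board.headI.length < 4 ∨
    (-(board.length : Int) ≤ row_val ∧ row_val < (board.length : Int) ∧
      board.headI.length ≤ ((PySem.List.pyGet? board row_val).getD []).length))
instance (board : List (List String)) (row_val : Int) (player_symbol : String) : Decidable (Pre_verify_all_consecutive_columns_are_same_py board row_val player_symbol) := by unfold Pre_verify_all_consecutive_columns_are_same_py; infer_instance

def pvWitness_verify_all_consecutive_columns_are_same_py : List (List String) × Int × String :=
  ([["a", "a", "a", "a"]], 0, "a")

def Spec_verify_all_consecutive_columns_are_same_py (board : List (List String)) (row_val : Int) (player_symbol : String) (out : Bool) : Prop := out = verify_all_consecutive_columns_are_same_py_alt board row_val player_symbol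
instance (board : List (List String)) (row_val : Int) (player_symbol : String) (out : Bool) : Decidable (Spec_verify_all_consecutive_columns_are_same_py board row_val player_symbol out) := by unfold Spec_verify_all_consecutive_columns_are_same_py; infer_instance

-- ===== CLAIM (what is proved, stated in full; the proofs are below) =====
def Claim_equal_verify_all_consecutive_columns_are_same_py : Prop := ∀ (board : List (List String)) (row_val : Int) (player_symbol : String), Dom_verify_all_consecutive_columns_are_same_py board row_val player_symbol → Pre_verify_all_consecutive_columns_are_same_py board row_val player_symbol → Spec_verify_all_consecutive_columns_are_same_py board row_val player_symbol (verify_all_consecutive_columns_are_same_py board row_val player_symbol)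

-- ===== LEMMAS AND PROOFS =====

-- A's loop finds a 4-window of matches starting at some column in [col, col+fuel) ∩ [·, len0-3).
theorem pvWhileA_eq_true_iff (cell : Int → Bool) (len0 : Int) :
    ∀ (fuel : Nat) (col : Int),
      pvWhileA cell len0 fuel col = true ↔
        ∃ c : Int, col ≤ c ∧ c < col + fuel ∧ c < len0 - 3 ∧
          (cell c && cell (c + 1) && cell (c + 2) && cell (c + 3)) = true := by
  intro fuel
  induction fuel with
  | zero =>
    intro col
    simp [pvWhileA]
    intro c h1 h2
    omega
  | succ n ih =>
    intro col
    by_cases hg : col < len0 - 3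
    · by_cases hw : (cell col && cell (col + 1) && cell (col + 2) && cell (col + 3)) = true
      · simp [pvWhileA, hg, hw]
        exact ⟨col, le_refl _, by omega, hg, by simpa using hw⟩
      · simp only [pvWhileA, if_pos hg, if_neg hw, ih (col + 1)]
        constructor
        · rintro ⟨c, h1, h2, h3, h4⟩
          exact ⟨c, by omega, by omega, h3, h4⟩
        · rintro ⟨c, h1, h2, h3, h4⟩
          refine ⟨c, ?_, by omega, h3, h4⟩
          rcases lt_or_eq_of_le h1 with h | h
          · omega
          · exfalso; exact hw (h ▸ h4)
    · simp [pvWhileA, hg]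
      intro c h1 h2 h3
      omega

-- B's sweep: with a valid run of `count` matches just before `lo`, it finds the first column c in
-- [lo, lo+n) at which the four cells c, c-1, c-2, c-3 all match (the run may dip below lo by count).
theorem pvSweepB_eq_true_iff (cell : Int → Bool) :
    ∀ (n : Nat) (lo count : Int),
      0 ≤ count → count ≤ 3 →
      (∀ j : Int, 1 ≤ j → j ≤ count → cell (lo - j) = true) →
      (pvSweepB cell (PySem.List.pyRange lo (lo + n) 1) count = true ↔
        ∃ c : Int, lo ≤ c ∧ c < lo + n ∧ lo - count ≤ c - 3 ∧
          (∀ j : Int, 0 ≤ j → j ≤ 3 → cell (c - j) = true)) := by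
  intro n
  induction n with
  | zero =>
    intro lo count _ _ _
    rw [PySem.List.pyRange_one_eq_nil (by omega)]
    simp [pvSweepB]
    intro c h1 h2
    omega
  | succ n ih =>
    intro lo count h0 h3 hrun
    rw [show lo + ((n : Nat) + 1 : Nat) = lo + (n + 1 : Int) by push_cast; ring,
        PySem.List.pyRange_one_cons (by omega)]
    by_cases hc : cell lo = true
    · by_cases hcount : count = 3
      · -- counter reaches 4 at lo
        subst hcount
        have hstep : pvSweepB cell (lo :: PySem.List.pyRange (lo + 1) (lo + ((n : Int) + 1)) 1) 3 = true := by
          simp [pvSweepB, hc]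
        rw [hstep]
        refine ⟨fun _ => ⟨lo, le_refl _, by omega, by omega, ?_⟩, fun _ => rfl⟩
        intro j hj0 hj3
        rcases (by omega : j = 0 ∨ (1 ≤ j ∧ j ≤ 3)) with h | h
        · simpa [h] using hc
        · simpa using hrun j h.1 (by omega)
      · have h4' : ((count + 1 : Int) == 4) = false := by simp; omega
        have hstep : pvSweepB cell (lo :: PySem.List.pyRange (lo + 1) (lo + ((n : Int) + 1)) 1) count
            = pvSweepB cell (PySem.List.pyRange (lo + 1) (lo + ((n : Int) + 1)) 1) (count + 1) := by
          simp [pvSweepB, hc, h4']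
        rw [hstep]
        have hrun' : ∀ j : Int, 1 ≤ j → j ≤ count + 1 → cell (lo + 1 - j) = true := by
          intro j hj1 hj2
          rcases (by omega : j = 1 ∨ 2 ≤ j) with h | h
          · simpa [h] using hc
          · have := hrun (j - 1) (by omega) (by omega)
            simpa [show lo - (j - 1) = lo + 1 - j by ring] using this
        have := ih (lo + 1) (count + 1) (by omega) (by omega) hrun'
        rw [show lo + 1 + (n : Int) = lo + ((n : Int) + 1) by ring] at this
        rw [this]
        constructor
        · rintro ⟨c, H1, H2, H3, H4⟩
          exact ⟨c, by omega, H2, by omega, H4⟩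
        · rintro ⟨c, H1, H2, H3, H4⟩
          refine ⟨c, ?_, H2, by omega, H4⟩
          rcases (by omega : lo + 1 ≤ c ∨ c = lo) with h | h
          · exact h
          · exfalso; omega
    · have hc' : cell lo = false := by simpa using hc
      have hstep : pvSweepB cell (lo :: PySem.List.pyRange (lo + 1) (lo + ((n : Int) + 1)) 1) count
          = pvSweepB cell (PySem.List.pyRange (lo + 1) (lo + ((n : Int) + 1)) 1) 0 := by
        simp [pvSweepB, hc']
      rw [hstep]
      have := ih (lo + 1) 0 (by omega) (by omega) (by intro j hj1 hj2; omega)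
      rw [show lo + 1 + (n : Int) = lo + ((n : Int) + 1) by ring] at this
      rw [this]
      constructor
      · rintro ⟨c, H1, H2, H3, H4⟩
        exact ⟨c, by omega, H2, by omega, H4⟩
      · rintro ⟨c, H1, H2, H3, H4⟩
        have hgt : lo + 1 ≤ c - 3 := by
          by_contra hlt
          have := H4 (c - lo) (by omega) (by omega)
          rw [show c - (c - lo) = lo by ring] at this
          exact absurd this (by simp [hc'])
        exact ⟨c, by omega, H2, by omega, H4⟩

-- ===== VERDICT (by name: the statement is the Claim_ definition above) =====
theorem verify_all_consecutive_columns_are_same_py_spec : Claim_equal_verify_all_consecutive_columns_are_same_py := by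
  intro board row_val player_symbol _ _
  unfold Spec_verify_all_consecutive_columns_are_same_py
  unfold verify_all_consecutive_columns_are_same_py verify_all_consecutive_columns_are_same_py_alt
  set len0 : Int := (((PySem.List.pyGet? board 0).getD []).length : Int) with hlen0
  set cell : Int → Bool := fun c =>
    (PySem.List.pyGet? ((PySem.List.pyGet? board row_val).getD []) c).getD "" == player_symbol with hcell
  have hlen0nn : 0 ≤ len0 := by positivity
  by_cases h4 : len0 < 4
  · have : (len0 - 3).toNat = 0 := by omega
    simp [this, pvWhileA, h4]
  · rw [if_neg h4]
    have hA := pvWhileA_eq_true_iff cell len0 (len0 - 3).toNat 0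
    have hB := pvSweepB_eq_true_iff cell len0.toNat 0 0 (by omega) (by omega)
                 (by intro j hj1 hj2; omega)
    rw [show (0 : Int) + (len0.toNat : Int) = len0 by omega] at hB
    rw [Bool.eq_iff_iff, hA, hB]
    constructor
    · rintro ⟨c, h1, h2, h3, h4c⟩
      simp only [Bool.and_eq_true] at h4c
      refine ⟨c + 3, by omega, by omega, by omega, ?_⟩
      intro j hj0 hj3
      rcases (by omega : j = 0 ∨ j = 1 ∨ j = 2 ∨ j = 3) with h | h | h | h <;>
        · subst h
          first
          | simpa [show c + 3 - (0:Int) = c + 3 by ring] using h4c.2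
          | simpa [show c + 3 - (1:Int) = c + 2 by ring] using h4c.1.2
          | simpa [show c + 3 - (2:Int) = c + 1 by ring] using h4c.1.1.2
          | simpa [show c + 3 - (3:Int) = c by ring] using h4c.1.1.1
    · rintro ⟨c, h1, h2, h3, h4c⟩
      refine ⟨c - 3, by omega, by omega, by omega, ?_⟩
      simp only [Bool.and_eq_true]
      refine ⟨⟨⟨?_, ?_⟩, ?_⟩, ?_⟩
      · simpa [show c - 3 = c - (3:Int) by ring] using h4c 3 (by omega) (by omega)
      · simpa [show c - 3 + 1 = c - (2:Int) by ring] using h4c 2 (by omega) (by omega)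
      · simpa [show c - 3 + 2 = c - (1:Int) by ring] using h4c 1 (by omega) (by omega)
      · simpa [show c - 3 + 3 = c - (0:Int) by ring] using h4c 0 (by omega) (by omega)
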